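-- pv_equiv track=rewrite | github.com/sontung/old_code | segmentation_swin/2D_segmentation_inference.py | partition_by_none
-- ===== SOURCE A (Python) =====
-- def partition_by_none(path):
--     ind = 0
--     start = None
--     ranges = []
--     while ind < len(path):
--         if path[ind] != 0 and start is None:
--             start = ind
--         elif path[ind] == 0 and start is not None:
--             end = ind
--             ranges.append((start, end))
--             start = None
--         ind += 1
--     if start is not None:
--         ranges.append((start, ind))
--     return ranges
-- ===== SOURCE B (Python) =====
-- from itertools import groupby
--
--
-- def partition_by_none(path):
--     ranges = []
--     offset = 0
--     for nonzero, group in groupby(path, key=lambda x: x != 0):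
--         length = sum(1 for _ in group)
--         if nonzero:
--             ranges.append((offset, offset + length))
--         offset += length
--     return ranges
-- ===== Notes on version B (the rewrite author's own statement) =====
-- stated objective: idiomatic
-- what changed: B groups the input into maximal runs with itertools.groupby and emits one range per non-zero run while advancing a length offset, instead of A's flat index scan with a start sentinel and a post-loop flush.
import Mathlib
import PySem

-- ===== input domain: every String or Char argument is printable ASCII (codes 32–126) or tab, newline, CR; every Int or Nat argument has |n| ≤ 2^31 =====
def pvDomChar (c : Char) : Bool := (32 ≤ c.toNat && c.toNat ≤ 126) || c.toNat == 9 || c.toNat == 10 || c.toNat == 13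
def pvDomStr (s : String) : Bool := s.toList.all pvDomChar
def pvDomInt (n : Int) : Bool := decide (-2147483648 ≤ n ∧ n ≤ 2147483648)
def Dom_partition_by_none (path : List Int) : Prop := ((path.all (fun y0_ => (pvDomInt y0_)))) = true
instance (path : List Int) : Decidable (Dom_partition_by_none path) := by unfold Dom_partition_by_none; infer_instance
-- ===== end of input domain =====

-- B re-groups the input into maximal runs (itertools.groupby style) and emits one range per
-- non-zero run while advancing a length offset, instead of A's flat index scan with a start
-- sentinel and a post-loop flush; objective: more idiomatic, same O(n) cost.

-- ===== PORT A =====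
-- while loop of A: state (ind, start, ranges); post-loop flush when start is set
def pvLoopA : List Int → Int → Option Int → List (Int × Int) → List (Int × Int)
  | [], ind, start, ranges =>
      match start with
      | none => ranges
      | some s => ranges ++ [(s, ind)]
  | x :: xs, ind, start, ranges =>
      if x ≠ 0 ∧ start = none then
        pvLoopA xs (ind + 1) (some ind) ranges
      else if x = 0 ∧ start ≠ none then
        pvLoopA xs (ind + 1) none (ranges ++ [(start.getD 0, ind)])
      else
        pvLoopA xs (ind + 1) start ranges

def partition_by_none (path : List Int) : List (Int × Int) :=
  pvLoopA path 0 none []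

-- ===== PORT B =====
-- itertools.groupby(path, key=lambda x: x != 0), each group reduced to (key, length)
def pvGroupRuns : List Int → List (Bool × Int)
  | [] => []
  | x :: xs =>
      let k := decide (x ≠ 0)
      (k, 1 + ((xs.takeWhile (fun y => decide (y ≠ 0) == k)).length : Int)) ::
        pvGroupRuns (xs.dropWhile (fun y => decide (y ≠ 0) == k))
  termination_by l => l.length
  decreasing_by
    simp only [List.length_cons]
    exact Nat.lt_succ_of_le (List.length_dropWhile_le _ _)

-- the for loop of Source B: state (ranges, offset)
def partition_by_none_alt (path : List Int) : List (Int × Int) :=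
  ((pvGroupRuns path).foldl
    (fun (st : List (Int × Int) × Int) (r : Bool × Int) =>
      (if r.1 then st.1 ++ [(st.2, st.2 + r.2)] else st.1, st.2 + r.2))
    ([], 0)).1

-- ===== PRECONDITION & SPEC =====
def Spec_partition_by_none (path : List Int) (out : List (Int × Int)) : Prop := out = partition_by_none_alt path
instance (path : List Int) (out : List (Int × Int)) : Decidable (Spec_partition_by_none path out) := by unfold Spec_partition_by_none; infer_instance

-- ===== CLAIM (what is proved, stated in full; the proofs are below) =====
def Claim_equal_partition_by_none : Prop := ∀ (path : List Int), Dom_partition_by_none path → Spec_partition_by_none path (partition_by_none path)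

-- ===== LEMMAS AND PROOFS =====

-- reference single-step scanner: both ports are reduced to it
def pvRefS : List Int → Int → Option Int → List (Int × Int)
  | [], _, none => []
  | [], ind, some s => [(s, ind)]
  | x :: xs, ind, none =>
      if x ≠ 0 then pvRefS xs (ind + 1) (some ind) else pvRefS xs (ind + 1) none
  | x :: xs, ind, some s =>
      if x = 0 then (s, ind) :: pvRefS xs (ind + 1) none else pvRefS xs (ind + 1) (some s)

theorem pvLoopA_eq_refS (xs : List Int) : ∀ (ind : Int) (start : Option Int) (ranges : List (Int × Int)),
    pvLoopA xs ind start ranges = ranges ++ pvRefS xs ind start := by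
  induction xs with
  | nil =>
      intro ind start ranges
      cases start <;> simp [pvLoopA, pvRefS]
  | cons x xs ih =>
      intro ind start ranges
      cases start with
      | none =>
          by_cases hx : x = 0 <;> simp [pvLoopA, pvRefS, hx, ih]
      | some s =>
          by_cases hx : x = 0 <;> simp [pvLoopA, pvRefS, hx, ih]

-- cons-style emission over the runs
def pvEmit : List (Bool × Int) → Int → List (Int × Int)
  | [], _ => []
  | r :: rs, off =>
      if r.1 then (off, off + r.2) :: pvEmit rs (off + r.2) else pvEmit rs (off + r.2)

theorem pvFoldl_eq_emit (rs : List (Bool × Int)) : ∀ (acc : List (Int × Int)) (off : Int),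
    (rs.foldl
      (fun (st : List (Int × Int) × Int) (r : Bool × Int) =>
        (if r.1 then st.1 ++ [(st.2, st.2 + r.2)] else st.1, st.2 + r.2))
      (acc, off)).1 = acc ++ pvEmit rs off := by
  induction rs with
  | nil => intro acc off; simp [pvEmit]
  | cons r rs ih =>
      intro acc off
      by_cases hr : r.1 <;> simp [List.foldl_cons, pvEmit, hr, ih]

theorem pvRefS_zeros (zs : List Int) : ∀ (rest : List Int) (off : Int),
    (∀ z ∈ zs, z = 0) →
    pvRefS (zs ++ rest) off none = pvRefS rest (off + zs.length) none := by
  induction zs with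
  | nil => intro rest off _; simp
  | cons z zs ih =>
      intro rest off hz
      have hz0 : z = 0 := hz z (by simp)
      rw [List.cons_append]
      show (if z ≠ 0 then pvRefS (zs ++ rest) (off + 1) (some off)
            else pvRefS (zs ++ rest) (off + 1) none) = _
      rw [if_neg (by simp [hz0])]
      rw [ih rest (off + 1) (fun a ha => hz a (by simp [ha]))]
      congr 1
      simp only [List.length_cons]
      push_cast
      ring

theorem pvRefS_nonzeros (ns : List Int) : ∀ (rest : List Int) (off s : Int),
    (∀ z ∈ ns, z ≠ 0) →
    pvRefS (ns ++ rest) off (some s) = pvRefS rest (off + ns.length) (some s) := by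
  induction ns with
  | nil => intro rest off s _; simp
  | cons n ns ih =>
      intro rest off s hn
      have hn0 : n ≠ 0 := hn n (by simp)
      rw [List.cons_append]
      show (if n = 0 then (s, off) :: pvRefS (ns ++ rest) (off + 1) none
            else pvRefS (ns ++ rest) (off + 1) (some s)) = _
      rw [if_neg hn0]
      rw [ih rest (off + 1) s (fun a ha => hn a (by simp [ha]))]
      congr 1
      simp only [List.length_cons]
      push_cast
      ring

theorem pvDropWhile_head {α : Type} (p : α → Bool) (l : List α) (a : α) (l' : List α)
    (h : l.dropWhile p = a :: l') : p a = false := by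
  induction l with
  | nil => simp [List.dropWhile] at h
  | cons x xs ih =>
      rw [List.dropWhile_cons] at h
      by_cases hp : p x
      · exact ih (by simpa [hp] using h)
      · simp [hp] at h
        rw [← h.1]
        simpa using hp

theorem pvEmit_runs_eq_refS : ∀ (xs : List Int) (off : Int),
    pvEmit (pvGroupRuns xs) off = pvRefS xs off none
  | [], off => by simp [pvGroupRuns, pvEmit, pvRefS]
  | x :: xs, off => by
      by_cases hx : x = 0
      case pos =>
        have hk : decide (x ≠ 0) = false := by simp [hx]
        rw [pvGroupRuns]
        simp only [hk]
        rw [pvEmit]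
        rw [if_neg (by simp)]
        have hsplit := List.takeWhile_append_dropWhile
          (p := fun y => decide (y ≠ 0) == false) (l := xs)
        have hz : ∀ z ∈ xs.takeWhile (fun y => decide (y ≠ 0) == false), z = 0 := by
          intro z hzmem
          have := List.mem_takeWhile_imp hzmem
          simpa using this
        rw [show pvRefS (x :: xs) off none =
              (if x ≠ 0 then pvRefS xs (off + 1) (some off) else pvRefS xs (off + 1) none) from rfl]
        rw [if_neg (by simp [hx])]
        conv_rhs => rw [← hsplit]
        rw [pvRefS_zeros _ _ _ hz]
        rw [pvEmit_runs_eq_refS (xs.dropWhile (fun y => decide (y ≠ 0) == false)) _]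
        congr 1
        push_cast
        ring
      case neg =>
        have hk : decide (x ≠ 0) = true := by simp [hx]
        rw [pvGroupRuns]
        simp only [hk]
        rw [pvEmit]
        rw [if_pos (by simp)]
        have hsplit := List.takeWhile_append_dropWhile
          (p := fun y => decide (y ≠ 0) == true) (l := xs)
        have hn : ∀ z ∈ xs.takeWhile (fun y => decide (y ≠ 0) == true), z ≠ 0 := by
          intro z hzmem
          have := List.mem_takeWhile_imp hzmem
          simpa using this
        rw [show pvRefS (x :: xs) off none =
              (if x ≠ 0 then pvRefS xs (off + 1) (some off) else pvRefS xs (off + 1) none) from rfl]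
        rw [if_pos hx]
        conv_rhs => rw [← hsplit]
        rw [pvRefS_nonzeros _ _ _ _ hn]
        rcases hrest : xs.dropWhile (fun y => decide (y ≠ 0) == true) with _ | ⟨z, rest'⟩
        all_goals dsimp only
        all_goals rw [show off + (1 + ((xs.takeWhile (fun y => decide (y ≠ 0) == true)).length : Int)) =
              off + 1 + ((xs.takeWhile (fun y => decide (y ≠ 0) == true)).length : Int) from by ring]
        · simp [pvGroupRuns, pvEmit, pvRefS]
        · have hz0 : z = 0 := by
            have := pvDropWhile_head _ _ _ _ hrest
            simpa using this
          rw [pvEmit_runs_eq_refS (z :: rest')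
            (off + 1 + ((xs.takeWhile (fun y => decide (y ≠ 0) == true)).length : Int))]
          rw [show pvRefS (z :: rest')
                (off + 1 + ((xs.takeWhile (fun y => decide (y ≠ 0) == true)).length : Int)) none =
              (if z ≠ 0 then
                pvRefS rest' (off + 1 + ((xs.takeWhile (fun y => decide (y ≠ 0) == true)).length : Int) + 1)
                  (some (off + 1 + ((xs.takeWhile (fun y => decide (y ≠ 0) == true)).length : Int)))
               else
                pvRefS rest' (off + 1 + ((xs.takeWhile (fun y => decide (y ≠ 0) == true)).length : Int) + 1)
                  none) from rfl]
          rw [if_neg (by simp [hz0])]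
          rw [show pvRefS (z :: rest')
                (off + 1 + ((xs.takeWhile (fun y => decide (y ≠ 0) == true)).length : Int)) (some off) =
              (if z = 0 then
                (off, off + 1 + ((xs.takeWhile (fun y => decide (y ≠ 0) == true)).length : Int)) ::
                  pvRefS rest' (off + 1 + ((xs.takeWhile (fun y => decide (y ≠ 0) == true)).length : Int) + 1)
                    none
               else
                pvRefS rest' (off + 1 + ((xs.takeWhile (fun y => decide (y ≠ 0) == true)).length : Int) + 1)
                  (some off)) from rfl]
          rw [if_pos hz0]
  termination_by xs _ => xs.length
  decreasing_by
    · simp only [List.length_cons]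
      exact Nat.lt_succ_of_le (List.length_dropWhile_le _ _)
    · simp only [List.length_cons]
      have h1 : (z :: rest').length ≤ xs.length := by
        rw [← hrest]; exact List.length_dropWhile_le _ _
      simp only [List.length_cons] at h1
      omega

-- ===== VERDICT (by name: the statement is the Claim_ definition above) =====
theorem partition_by_none_spec : Claim_equal_partition_by_none := by
  intro path _
  show partition_by_none path = partition_by_none_alt path
  rw [partition_by_none, partition_by_none_alt, pvLoopA_eq_refS, pvFoldl_eq_emit,
    pvEmit_runs_eq_refS]
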